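-- pv_equiv track=rewrite | github.com/zeoxisca/SMS4 | extend/EN.py | uni2bit
-- ===== SOURCE A (Python) =====
-- def uni2bit(in_text, length):  # unicode转换为二进制
--     out_text = []
--     for i in range(length * 16):
--         out_text.append((in_text[int(i / 16)] >> (i % 16)) & 1)
--     if len(out_text) % 128 != 0:
--         for j in range(128 - len(out_text) % 128):
--             out_text.append(0)
--     return out_text
-- ===== SOURCE B (Python) =====
-- def uni2bit(in_text, length):
--     # Stage through a little-endian byte buffer: two bytes per character, zero-pad
--     # the buffer to a multiple of 16 bytes (= 128 bits) in closed form, then expand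
--     # each byte to its 8 bits.
--     buf = bytearray()
--     for k in range(length):
--         w = in_text[k] % 65536
--         buf.append(w & 0xFF)
--         buf.append(w >> 8)
--     buf.extend(bytes((-len(buf)) % 16))
--     out_text = []
--     for byte in buf:
--         for b in range(8):
--             out_text.append((byte >> b) & 1)
--     return out_text
-- ===== Notes on version B (the rewrite author's own statement) =====
-- stated objective: faster
-- what changed: B stages the output through a little-endian byte buffer (two bytes per character, zero-padded to 16-byte alignment with a closed-form count, then expanded 8 bits per byte), so A's flat per-bit loop computing i//16 and i%16 for every bit and A's incremental bit-padding loop both disappear.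
import Mathlib
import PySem

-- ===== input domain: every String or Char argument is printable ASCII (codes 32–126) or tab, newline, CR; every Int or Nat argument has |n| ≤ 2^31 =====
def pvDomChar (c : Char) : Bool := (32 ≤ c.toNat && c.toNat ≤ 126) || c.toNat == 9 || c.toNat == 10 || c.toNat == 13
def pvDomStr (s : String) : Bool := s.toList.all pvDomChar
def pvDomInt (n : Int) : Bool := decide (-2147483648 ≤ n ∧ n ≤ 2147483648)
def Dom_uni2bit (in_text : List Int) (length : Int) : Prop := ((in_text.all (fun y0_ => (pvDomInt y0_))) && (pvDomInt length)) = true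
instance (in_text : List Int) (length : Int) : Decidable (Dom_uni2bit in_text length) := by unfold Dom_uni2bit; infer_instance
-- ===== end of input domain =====

-- B stages the output through a little-endian byte buffer (two bytes per character,
-- closed-form zero-padding to 16-byte alignment, then 8 bits per byte) instead of
-- A's flat per-bit loop with i//16, i%16 and an incremental padding loop.


-- ===== PORT A =====
-- int(i / 16) is exact here (i ≥ 0, division by a power of two): ported as floor division.
def uni2bit (in_text : List Int) (length : Int) : List Int :=
  let out_text : List Int := []
  let out_text := (PySem.List.pyRange 0 (length * 16) 1).foldl
    (fun acc i =>
      acc ++ [PySem.Int.band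
        (PySem.List.pyGetD in_text (PySem.Int.floordiv i 16) 0 >>> (PySem.Int.mod i 16).toNat) 1])
    out_text
  if PySem.Int.mod (out_text.length : Int) 128 ≠ 0 then
    (PySem.List.pyRange 0 (128 - PySem.Int.mod (out_text.length : Int) 128) 1).foldl
      (fun acc _ => acc ++ [(0 : Int)]) out_text
  else out_text

-- ===== PORT B =====
-- bytes(m) (m zero bytes) is ported as List.replicate; bytearray bytes are Ints 0..255.
def uni2bit_alt (in_text : List Int) (length : Int) : List Int :=
  let buf : List Int := (PySem.List.pyRange 0 length 1).foldl
    (fun acc k =>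
      let w := PySem.Int.mod (PySem.List.pyGetD in_text k 0) 65536
      acc ++ [PySem.Int.mod w 256] ++ [PySem.Int.floordiv w 256]) []
  let buf := buf ++ List.replicate (PySem.Int.mod (-(buf.length : Int)) 16).toNat (0 : Int)
  buf.foldl
    (fun acc byte =>
      (PySem.List.pyRange 0 8 1).foldl
        (fun acc2 b => acc2 ++ [PySem.Int.band (byte >>> b.toNat) 1]) acc) []

-- ===== PRECONDITION & SPEC =====
-- Pre_ excludes exactly the inputs where Python raises IndexError (length exceeds the list length).
def Pre_uni2bit (in_text : List Int) (length : Int) : Prop := length ≤ (in_text.length : Int)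
instance (in_text : List Int) (length : Int) : Decidable (Pre_uni2bit in_text length) := by
  unfold Pre_uni2bit; infer_instance
def pvWitness_uni2bit : List Int × Int := ([65, -3, 1000], 3)

def Spec_uni2bit (in_text : List Int) (length : Int) (out : List Int) : Prop := out = uni2bit_alt in_text length
instance (in_text : List Int) (length : Int) (out : List Int) : Decidable (Spec_uni2bit in_text length out) := by unfold Spec_uni2bit; infer_instance

-- ===== CLAIM (what is proved, stated in full; the proofs are below) =====
def Claim_equal_uni2bit : Prop := ∀ (in_text : List Int) (length : Int), Dom_uni2bit in_text length → Pre_uni2bit in_text length → Spec_uni2bit in_text length (uni2bit in_text length)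

-- ===== LEMMAS AND PROOFS =====

-- A's flat bit index splits into character index and bit offset
theorem pvBit_agree (in_text : List Int) (n k : Nat) (hk : k < 16) :
    PySem.Int.band
      (PySem.List.pyGetD in_text (PySem.Int.floordiv ((n : Int) * 16 + k) 16) 0
        >>> (PySem.Int.mod ((n : Int) * 16 + k) 16).toNat) 1
    = PySem.Int.band (PySem.List.pyGetD in_text (n : Int) 0 >>> ((k : Int)).toNat) 1 := by
  have hdiv : PySem.Int.floordiv ((n : Int) * 16 + k) 16 = (n : Int) := by
    rw [PySem.Int.floordiv_eq_iff_of_pos (by norm_num)]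
    constructor <;> omega
  have hmod : PySem.Int.mod ((n : Int) * 16 + k) 16 = (k : Int) := by
    rw [PySem.Int.mod_eq_emod_of_pos (by norm_num)]
    omega
  rw [hdiv, hmod]

-- A's flat bit list, regrouped into one 16-bit chunk per character
theorem pvBits_eq (in_text : List Int) (n : Nat) :
    (PySem.List.pyRange 0 ((n : Int) * 16) 1).map
      (fun i => PySem.Int.band
        (PySem.List.pyGetD in_text (PySem.Int.floordiv i 16) 0 >>> (PySem.Int.mod i 16).toNat) 1)
      = (PySem.List.pyRange 0 (n : Int) 1).flatMap
          (fun k => (PySem.List.pyRange 0 16 1).map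
            (fun b => PySem.Int.band (PySem.List.pyGetD in_text k 0 >>> b.toNat) 1)) := by
  induction n with
  | zero => simp
  | succ m ih =>
    have h1 : PySem.List.pyRange 0 (((m : Int) + 1) * 16) 1
        = PySem.List.pyRange 0 ((m : Int) * 16) 1
          ++ PySem.List.pyRange ((m : Int) * 16) ((m : Int) * 16 + 16) 1 := by
      have := PySem.List.pyRange_one_append (a := 0) (m := (m : Int) * 16)
        (b := (m : Int) * 16 + 16) (by omega) (by omega)
      rw [show ((m : Int) + 1) * 16 = (m : Int) * 16 + 16 by ring, this]
    have h2 : PySem.List.pyRange 0 ((m : Int) + 1) 1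
        = PySem.List.pyRange 0 (m : Int) 1 ++ [(m : Int)] :=
      PySem.List.pyRange_one_succ_right (a := 0) (b := (m : Int)) (by omega)
    have hchunk : (PySem.List.pyRange ((m : Int) * 16) ((m : Int) * 16 + 16) 1).map
        (fun i => PySem.Int.band
          (PySem.List.pyGetD in_text (PySem.Int.floordiv i 16) 0 >>> (PySem.Int.mod i 16).toNat) 1)
        = (PySem.List.pyRange 0 16 1).map
            (fun b => PySem.Int.band (PySem.List.pyGetD in_text (m : Int) 0 >>> b.toNat) 1) := by
      rw [PySem.List.pyRange_one ((m : Int) * 16) ((m : Int) * 16 + 16),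
          PySem.List.pyRange_one 0 16]
      simp only [add_sub_cancel_left, sub_zero, List.map_map]
      show (List.range (16 : Int).toNat).map _ = (List.range (16 : Int).toNat).map _
      apply List.map_congr_left
      intro k hk
      simp only [List.mem_range] at hk
      simp only [Function.comp]
      rw [zero_add]
      rw [pvBit_agree in_text m k (by exact_mod_cast hk),
          Int.shiftRight_natCast_right]
    push_cast
    rw [h1, h2, List.map_append, List.flatMap_append, ih, hchunk]
    simp

-- bit b of the low part x % 2^p agrees with bit b of x, for b < p
theorem pvLow_bit (x : Int) (p b : Nat) (hb : b < p) :
    (x % 2 ^ p / 2 ^ b) % 2 = (x / 2 ^ b) % 2 := by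
  have hsplit : (2:Int) ^ (p - b - 1) * 2 * 2 ^ b = 2 ^ p := by
    rw [mul_assoc, ← pow_succ', ← pow_add, show p - b - 1 + (b + 1) = p by omega]
  have hx : x = x % 2 ^ p + x / 2 ^ p * ((2:Int) ^ (p - b - 1) * 2 * 2 ^ b) := by
    rw [hsplit]
    linear_combination - Int.emod_add_ediv x (2 ^ p)
  conv_rhs => rw [hx, show x % 2 ^ p + x / 2 ^ p * ((2:Int) ^ (p - b - 1) * 2 * 2 ^ b)
      = x % 2 ^ p + (x / 2 ^ p * 2 ^ (p - b - 1) * 2) * 2 ^ b from by ring]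
  rw [Int.add_mul_ediv_right _ _ (by positivity : ((2:Int) ^ b) ≠ 0),
      Int.add_mul_emod_self_right]

-- bit b of the low byte of x % 65536 is bit b of x (b < 8)
theorem pvLoBit (x : Int) (b : Nat) (hb : b < 8) :
    PySem.Int.band (PySem.Int.mod (PySem.Int.mod x 65536) 256 >>> b) 1
      = PySem.Int.band (x >>> b) 1 := by
  rw [PySem.Int.band_one, PySem.Int.band_one,
      PySem.Int.mod_eq_emod_of_pos (b := 2) (by norm_num),
      PySem.Int.mod_eq_emod_of_pos (b := 2) (by norm_num),
      PySem.Int.mod_eq_emod_of_pos (b := 256) (by norm_num),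
      PySem.Int.mod_eq_emod_of_pos (b := 65536) (by norm_num),
      Int.shiftRight_eq_div_pow, Int.shiftRight_eq_div_pow]
  push_cast
  rw [show ((65536:Int)) = 2 ^ 16 from by norm_num, show ((256:Int)) = 2 ^ 8 from by norm_num,
      Int.emod_emod_of_dvd x (by norm_num : (2:Int) ^ 8 ∣ 2 ^ 16)]
  exact pvLow_bit x 8 b hb

-- bit b of the high byte of x % 65536 is bit 8+b of x (b < 8)
theorem pvHiBit (x : Int) (b : Nat) (hb : b < 8) :
    PySem.Int.band (PySem.Int.floordiv (PySem.Int.mod x 65536) 256 >>> b) 1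
      = PySem.Int.band (x >>> (8 + b)) 1 := by
  rw [PySem.Int.band_one, PySem.Int.band_one,
      PySem.Int.mod_eq_emod_of_pos (b := 2) (by norm_num),
      PySem.Int.mod_eq_emod_of_pos (b := 2) (by norm_num),
      PySem.Int.floordiv_eq_ediv_of_pos (by norm_num),
      PySem.Int.mod_eq_emod_of_pos (b := 65536) (by norm_num),
      Int.shiftRight_eq_div_pow, Int.shiftRight_eq_div_pow]
  push_cast
  rw [show ((65536:Int)) = 2 ^ 16 from by norm_num, show ((256:Int)) = 2 ^ 8 from by norm_num,
      Int.ediv_ediv_of_nonneg (by positivity), ← pow_add]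
  exact pvLow_bit x 16 (8 + b) (by omega)

-- the two bytes of a character carry exactly its 16 bits
-- (shift instance spelled explicitly to match the ports' elaboration)
theorem pvBytes_eq (x : Int) :
    ((PySem.List.pyRange 0 8 1).map
        (fun b => PySem.Int.band
          (@HShiftRight.hShiftRight Int Nat Int Int.instHShiftRightNat
            (PySem.Int.mod (PySem.Int.mod x 65536) 256) b.toNat) 1)
      ++ (PySem.List.pyRange 0 8 1).map
        (fun b => PySem.Int.band
          (@HShiftRight.hShiftRight Int Nat Int Int.instHShiftRightNat
            (PySem.Int.floordiv (PySem.Int.mod x 65536) 256) b.toNat) 1))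
    = (PySem.List.pyRange 0 16 1).map
        (fun b => PySem.Int.band
          (@HShiftRight.hShiftRight Int Nat Int Int.instHShiftRightNat x b.toNat) 1) := by
  simp only [show PySem.List.pyRange 0 8 1 = [0, 1, 2, 3, 4, 5, 6, 7] from rfl,
    show PySem.List.pyRange 0 16 1 = [0, 1, 2, 3, 4, 5, 6, 7, 8, 9, 10, 11, 12, 13, 14, 15] from rfl,
    List.map_cons, List.map_nil, List.cons_append, List.nil_append, List.cons.injEq, and_true,
    Int.toNat_zero, Int.toNat_one, show ((2:Int).toNat) = 2 from rfl, show ((3:Int).toNat) = 3 from rfl, show ((4:Int).toNat) = 4 from rfl, show ((5:Int).toNat) = 5 from rfl, show ((6:Int).toNat) = 6 from rfl, show ((7:Int).toNat) = 7 from rfl, show ((8:Int).toNat) = 8 from rfl, show ((9:Int).toNat) = 9 from rfl, show ((10:Int).toNat) = 10 from rfl, show ((11:Int).toNat) = 11 from rfl, show ((12:Int).toNat) = 12 from rfl, show ((13:Int).toNat) = 13 from rfl, show ((14:Int).toNat) = 14 from rfl, show ((15:Int).toNat) = 15 from rfl]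
  exact ⟨pvLoBit x 0 (by norm_num), pvLoBit x 1 (by norm_num), pvLoBit x 2 (by norm_num),
    pvLoBit x 3 (by norm_num), pvLoBit x 4 (by norm_num), pvLoBit x 5 (by norm_num),
    pvLoBit x 6 (by norm_num), pvLoBit x 7 (by norm_num),
    pvHiBit x 0 (by norm_num), pvHiBit x 1 (by norm_num), pvHiBit x 2 (by norm_num),
    pvHiBit x 3 (by norm_num), pvHiBit x 4 (by norm_num), pvHiBit x 5 (by norm_num),
    pvHiBit x 6 (by norm_num), pvHiBit x 7 (by norm_num)⟩

-- a run of zero bytes expands to a run of zero bits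
theorem pvPad_eq (m : Nat) (g : Int → List Int) (h : g 0 = List.replicate 8 0) :
    (List.replicate m (0 : Int)).flatMap g = List.replicate (8 * m) (0 : Int) := by
  induction m with
  | zero => simp
  | succ k ih =>
    simp [List.replicate_succ, List.flatMap_cons, ih, h]
    ring_nf
    simp [List.replicate_add]

-- ===== VERDICT (by name: the statement is the Claim_ definition above) =====
theorem uni2bit_spec : Claim_equal_uni2bit := by
  intro in_text length _ _
  unfold Spec_uni2bit uni2bit uni2bit_alt
  by_cases hL : 0 ≤ length
  · simp only [PySem.List.foldl_append_singleton_eq_map, List.nil_append,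
      List.append_assoc, List.singleton_append, PySem.List.foldl_append_eq_flatMap]
    obtain ⟨L, rfl⟩ : ∃ L : Nat, length = (L : Int) := ⟨length.toNat, by omega⟩
    rw [List.flatMap_append, List.flatMap_assoc]
    simp only [List.flatMap_cons, List.flatMap_nil, List.append_nil]
    simp only [pvBytes_eq]
    rw [pvPad_eq _ _ (by rfl), pvBits_eq in_text L]
    simp only [Int.shiftRight_natCast_right, List.length_flatMap, List.length_map,
      List.length_cons, List.length_nil, PySem.List.length_pyRange_one, sub_zero,
      show ((16:Int)).toNat = 16 from rfl, Int.toNat_natCast,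
      List.map_const', List.sum_replicate, smul_eq_mul]
    rw [PySem.Int.mod_eq_emod_of_pos (a := ((L * 16 : Nat) : Int)) (by norm_num),
        PySem.Int.mod_eq_emod_of_pos (a := -((L * 2 : Nat) : Int)) (by norm_num)]
    by_cases hmod : ((L * 16 : Nat) : Int) % 128 = 0
    · rw [if_neg (by omega), show ((-((L * 2 : Nat) : Int)) % 16).toNat = 0 from by omega]
      simp
    · rw [if_pos (by omega)]
      congr 2
      omega
  · -- negative length: both sides are empty
    have e1 : PySem.List.pyRange 0 (length * 16) 1 = [] :=
      PySem.List.pyRange_one_eq_nil (by omega)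
    have e2 : PySem.List.pyRange 0 length 1 = [] :=
      PySem.List.pyRange_one_eq_nil (by omega)
    simp [e1, e2, PySem.Int.mod]
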